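-- pv_equiv track=rewrite | github.com/robinguy44/clamui | src/core/sanitize.py | _looks_like_path_continuation
-- ===== SOURCE A (Python) =====
-- _PATH_STOP_CHARS = "\r\n\t\"'<>|:,;)]}"
--
-- def _looks_like_path_continuation(text: str, start: int) -> bool:
--     """
--     Heuristic for allowing spaces inside a path candidate.
--
--     We continue consuming after a space only if the following token still looks
--     like a path segment or filename rather than normal prose.
--     """
--     index = start
--     text_length = len(text)
--
--     while index < text_length and text[index] == " ":
--         index += 1
--
--     if index >= text_length:
--         return False
--
--     token_has_dot = text[index] in (".", "~")
--
--     while index < text_length: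
--         char = text[index]
--         if char == " " or char in _PATH_STOP_CHARS:
--             break
--         if char in "/\\":
--             return True
--         if char == ".":
--             token_has_dot = True
--         index += 1
--
--     return token_has_dot
-- ===== SOURCE B (Python) =====
-- _PATH_STOP_CHARS = "\r\n\t\"'<>|:,;)]}"
--
--
-- def _looks_like_path_continuation(text: str, start: int) -> bool:
--     tail = text[start:].lstrip(" ")
--     end = next((k for k, c in enumerate(tail)
--                 if c == " " or c in _PATH_STOP_CHARS), len(tail))
--     token = tail[:end]
--     if not token:
--         return False
--     if "/" in token or "\\" in token:
--         return True
--     return token[0] in ".~" or "." in token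
-- ===== Notes on version B (the rewrite author's own statement) =====
-- stated objective: simpler
-- what changed: Replaces A's single early-returning stateful index scan with a decomposition: slice off the tail, strip spaces, find the token boundary, extract the token, then decide by plain membership tests on the token.
-- outside the precondition, e.g. on _looks_like_path_continuation('/x', -1): A returns True, B returns False; on _looks_like_path_continuation('ab', -5): A raises IndexError, B returns False
import Mathlib
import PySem

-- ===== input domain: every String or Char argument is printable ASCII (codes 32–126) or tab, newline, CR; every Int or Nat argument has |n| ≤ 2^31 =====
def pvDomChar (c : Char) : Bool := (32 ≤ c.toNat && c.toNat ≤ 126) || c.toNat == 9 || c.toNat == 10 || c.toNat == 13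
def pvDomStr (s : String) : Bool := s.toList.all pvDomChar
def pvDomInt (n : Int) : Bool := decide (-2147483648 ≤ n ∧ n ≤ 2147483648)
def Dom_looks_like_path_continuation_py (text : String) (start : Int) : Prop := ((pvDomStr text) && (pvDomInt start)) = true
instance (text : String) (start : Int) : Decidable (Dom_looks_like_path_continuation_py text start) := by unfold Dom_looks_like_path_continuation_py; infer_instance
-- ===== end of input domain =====

-- B decomposes A's single early-returning scan into slice / strip / boundary-find / membership tests on the token (objective: simpler); equivalence proved for 0 ≤ start.


-- module constant _PATH_STOP_CHARS (shared context of A and B)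
def pathStopChars : List Char := ['\r', '\n', '\t', '"', '\'', '<', '>', '|', ':', ',', ';', ')', ']', '}']

-- ===== PORT A =====
-- `while index < text_length and text[index] == " ": index += 1` (fuel = remaining distance to the end)
def pyA_skip (cs : List Char) (n : Int) (i : Int) (fuel : Nat) : Int :=
  match fuel with
  | 0 => i
  | fuel + 1 =>
    if i < n && (PySem.List.pyGet? cs i == some ' ') then pyA_skip cs n (i + 1) fuel else i

-- the second while loop of A, state = (index, token_has_dot)
def pyA_scan (cs : List Char) (n : Int) (i : Int) (hasDot : Bool) (fuel : Nat) : Bool :=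
  match fuel with
  | 0 => hasDot
  | fuel + 1 =>
    if i < n then
      match PySem.List.pyGet? cs i with
      | none => hasDot  -- Python raises IndexError here (index < -len); outside Pre_
      | some c =>
        if c == ' ' || pathStopChars.contains c then hasDot
        else if c == '/' || c == '\\' then true
        else pyA_scan cs n (i + 1) (hasDot || c == '.') fuel
    else hasDot

def looks_like_path_continuation_py (text : String) (start : Int) : Bool :=
  let cs := text.toList
  let n : Int := cs.length
  let i := pyA_skip cs n start (n - start).toNat
  if i ≥ n then false
  else
    match PySem.List.pyGet? cs i with
    | none => false  -- Python raises IndexError here (index < -len); outside Pre_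
    | some c => pyA_scan cs n i (c == '.' || c == '~') (n - i).toNat

-- ===== PORT B =====
-- tail = text[start:].lstrip(" "); end = first break index (default len(tail)); token = tail[:end]; membership tests
def looks_like_path_continuation_py_alt (text : String) (start : Int) : Bool :=
  let tail := (PySem.List.slice text.toList (some start) none).dropWhile (fun c => c == ' ')
  let e := tail.findIdx (fun c => c == ' ' || pathStopChars.contains c)
  let token := tail.take e
  match token with
  | [] => false
  | c :: _ =>
    if token.contains '/' || token.contains '\\' then true
    else (c == '.' || c == '~') || token.contains '.'

-- ===== PRECONDITION & SPEC =====
-- Pre_ restricts the claim to 0 ≤ start, the natural domain of a scan position: for negative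
-- start A raises IndexError when start < -len(text), and otherwise scans by Python's
-- negative-index wraparound (the suffix, then the whole string again), which no caller relies on.
def Pre_looks_like_path_continuation_py (text : String) (start : Int) : Prop := 0 ≤ start
instance (text : String) (start : Int) : Decidable (Pre_looks_like_path_continuation_py text start) := by unfold Pre_looks_like_path_continuation_py; infer_instance
def pvWitness_looks_like_path_continuation_py : String × Int := ("  ./conf file", 0)

def Spec_looks_like_path_continuation_py (text : String) (start : Int) (out : Bool) : Prop := out = looks_like_path_continuation_py_alt text start
instance (text : String) (start : Int) (out : Bool) : Decidable (Spec_looks_like_path_continuation_py text start out) := by unfold Spec_looks_like_path_continuation_py; infer_instance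

-- ===== CLAIM (what is proved, stated in full; the proofs are below) =====
def Claim_equal_looks_like_path_continuation_py : Prop := ∀ (text : String) (start : Int), Dom_looks_like_path_continuation_py text start → Pre_looks_like_path_continuation_py text start → Spec_looks_like_path_continuation_py text start (looks_like_path_continuation_py text start)

-- ===== LEMMAS AND PROOFS =====

-- A's second loop, reformulated structurally on the remaining suffix
def scanRest (rest : List Char) (h : Bool) : Bool :=
  match rest with
  | [] => h
  | c :: r =>
    if c == ' ' || pathStopChars.contains c then h
    else if c == '/' || c == '\\' then true
    else scanRest r (h || c == '.')

theorem drop_length_takeWhile (p : Char → Bool) (l : List Char) :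
    List.drop ((l.takeWhile p).length) l = l.dropWhile p := by
  have h := List.drop_left (l₁ := l.takeWhile p) (l₂ := l.dropWhile p)
  rw [List.takeWhile_append_dropWhile] at h
  exact h

theorem skip_eq (fuel : Nat) : ∀ (cs : List Char) (i : Int), 0 ≤ i →
    ((cs.length : Int) - i).toNat ≤ fuel →
    pyA_skip cs cs.length i fuel = i + ((cs.drop i.toNat).takeWhile (fun c => c == ' ')).length := by
  induction fuel with
  | zero =>
    intro cs i h0 hf
    have hlen : cs.length ≤ i.toNat := by omega
    simp [pyA_skip, List.drop_eq_nil_of_le hlen]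
  | succ f ih =>
    intro cs i h0 hf
    by_cases hi : i < (cs.length : Int)
    · have hit : i.toNat < cs.length := by omega
      have hget := PySem.List.pyGet?_eq_some_getElem cs h0 hi
      by_cases hc : (cs[i.toNat] == ' ') = true
      · have step : pyA_skip cs (cs.length : Int) i (f + 1) = pyA_skip cs (cs.length : Int) (i + 1) f := by
          simp [pyA_skip, hget, hi, hc]
        have h1 : (i + 1).toNat = i.toNat + 1 := by omega
        rw [step, ih cs (i + 1) (by omega) (by omega), h1,
            List.drop_eq_getElem_cons hit, List.takeWhile_cons]
        simp [hc]
        omega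
      · have step : pyA_skip cs (cs.length : Int) i (f + 1) = i := by
          simp [pyA_skip, hget, hc]
        rw [step, List.drop_eq_getElem_cons hit, List.takeWhile_cons]
        simp [hc]
    · have hd : cs.drop i.toNat = [] := List.drop_eq_nil_of_le (by omega)
      have step : pyA_skip cs (cs.length : Int) i (f + 1) = i := by
        simp [pyA_skip, hi]
      rw [step, hd]
      simp

theorem scan_eq (fuel : Nat) : ∀ (cs : List Char) (i : Int) (h : Bool), 0 ≤ i →
    ((cs.length : Int) - i).toNat ≤ fuel →
    pyA_scan cs cs.length i h fuel = scanRest (cs.drop i.toNat) h := by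
  induction fuel with
  | zero =>
    intro cs i h h0 hf
    have hlen : cs.length ≤ i.toNat := by omega
    simp [pyA_scan, List.drop_eq_nil_of_le hlen, scanRest]
  | succ f ih =>
    intro cs i h h0 hf
    by_cases hi : i < (cs.length : Int)
    · have hit : i.toNat < cs.length := by omega
      have hget := PySem.List.pyGet?_eq_some_getElem cs h0 hi
      have h1 : (i + 1).toNat = i.toNat + 1 := by omega
      have hrec := ih cs (i + 1) (h || (cs[i.toNat] == '.')) (by omega) (by omega)
      rw [h1] at hrec
      rw [List.drop_eq_getElem_cons hit]
      simp [pyA_scan, hget, hi, scanRest, hrec]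
    · have hd : cs.drop i.toNat = [] := List.drop_eq_nil_of_le (by omega)
      simp [pyA_scan, hi, hd, scanRest]

theorem stop_not_dot (c : Char) (h : (c == ' ' || pathStopChars.contains c) = true) :
    (c == '.' || c == '~') = false := by
  simp [pathStopChars] at h
  rcases h with rfl | rfl | rfl | rfl | rfl | rfl | rfl | rfl | rfl | rfl | rfl | rfl | rfl | rfl | rfl <;> rfl

theorem take_findIdx (p : Char → Bool) (l : List Char) :
    l.take (l.findIdx p) = l.takeWhile (fun c => !p c) := by
  induction l with
  | nil => simp
  | cons c r ih =>
    rw [List.findIdx_cons]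
    by_cases hc : p c = true
    · simp [hc]
    · simp [hc, List.take_succ_cons, ih]

theorem core (rest : List Char) (h : Bool) :
    scanRest rest h =
      (let token := rest.takeWhile (fun c => !(c == ' ' || pathStopChars.contains c))
       if token.contains '/' || token.contains '\\' then true else h || token.contains '.') := by
  induction rest generalizing h with
  | nil => simp [scanRest]
  | cons c r ih =>
    by_cases hb : c = ' ' ∨ c ∈ pathStopChars
    · rcases hb with rfl | hbm
      · simp [scanRest]
      · simp [scanRest, hbm]
    · by_cases hs : c = '/' ∨ c = '\\'
      · have h1 : ('/' : Char) ∉ pathStopChars := by decide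
        have h2 : ('\\' : Char) ∉ pathStopChars := by decide
        rcases hs with rfl | rfl <;> simp [scanRest, h1, h2]
      · have hφ : ¬('/' = c) := fun he => hs (Or.inl he.symm)
        have hψ : ¬('\\' = c) := fun he => hs (Or.inr he.symm)
        have hb1 : ¬(c = ' ') := fun he => hb (Or.inl he)
        have hb2 : ¬(c ∈ pathStopChars) := fun he => hb (Or.inr he)
        have hlhs : scanRest (c :: r) h = scanRest r (h || (c == '.')) := by
          simp [scanRest, hb, hs]
        rw [hlhs, ih]
        simp [List.takeWhile_cons, hb1, hb2, hφ, hψ, Bool.or_assoc]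
        have hdot : (c == '.') = decide (c = '.') := by
          by_cases hc : c = '.'
          · subst hc; rfl
          · simp [hc]
        have hflip : decide ('.' = c) = decide (c = '.') := by
          by_cases hc : c = '.'
          · subst hc; rfl
          · have hc' : ¬('.' = c) := fun he => hc he.symm
            simp [hc, hc']
        rw [hdot, hflip]

theorem A_char (text : String) (start : Int) (h0 : 0 ≤ start) :
    looks_like_path_continuation_py text start =
      (match (text.toList.drop start.toNat).dropWhile (fun c => c == ' ') with
       | [] => false
       | c :: r => scanRest (c :: r) (c == '.' || c == '~')) := by
  unfold looks_like_path_continuation_py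
  dsimp only
  rw [skip_eq (((text.toList.length : Int) - start).toNat) text.toList start h0 (le_refl _)]
  generalize hk : ((text.toList.drop start.toNat).takeWhile (fun c => c == ' ')).length = k
  have htail : text.toList.drop (start + (k : Int)).toNat
      = (text.toList.drop start.toNat).dropWhile (fun c => c == ' ') := by
    rw [show (start + (k : Int)).toNat = start.toNat + k by omega, ← List.drop_drop, ← hk,
      drop_length_takeWhile]
  split_ifs with hcond
  · have hnil : text.toList.drop (start + (k : Int)).toNat = [] :=
      List.drop_eq_nil_of_le (by omega)
    rw [← htail, hnil]
  · have hit : (start + (k : Int)).toNat < text.toList.length := by omega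
    have hget := PySem.List.pyGet?_eq_some_getElem text.toList
      (i := start + (k : Int)) (by omega) (by omega)
    rw [hget]
    dsimp only
    rw [scan_eq (((text.toList.length : Int) - (start + (k : Int))).toNat) text.toList
      (start + (k : Int)) _ (by omega) (le_refl _)]
    rw [← htail, List.drop_eq_getElem_cons hit]

theorem B_char (text : String) (start : Int) (h0 : 0 ≤ start) :
    looks_like_path_continuation_py_alt text start =
      (let tail := (text.toList.drop start.toNat).dropWhile (fun c => c == ' ')
       let token := tail.takeWhile (fun c => !(c == ' ' || pathStopChars.contains c))
       match token with
       | [] => false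
       | c :: _ =>
         if token.contains '/' || token.contains '\\' then true
         else (c == '.' || c == '~') || token.contains '.') := by
  unfold looks_like_path_continuation_py_alt
  dsimp only
  rw [PySem.List.slice_from _ h0, take_findIdx]

-- ===== VERDICT (by name: the statement is the Claim_ definition above) =====
theorem looks_like_path_continuation_py_spec : Claim_equal_looks_like_path_continuation_py := by
  intro text start _ hpre
  have h0 : (0 : Int) ≤ start := hpre
  unfold Spec_looks_like_path_continuation_py
  rw [A_char text start h0, B_char text start h0]
  dsimp only
  cases htail : (text.toList.drop start.toNat).dropWhile (fun c => c == ' ') with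
  | nil => rfl
  | cons c r =>
    dsimp only
    rw [core]
    dsimp only
    by_cases hb : c = ' ' ∨ c ∈ pathStopChars
    · have hbB : (c == ' ' || pathStopChars.contains c) = true := by simpa using hb
      have hnb : (!(c == ' ' || pathStopChars.contains c)) = false := by rw [hbB]; rfl
      rw [List.takeWhile_cons, hnb]
      simp [stop_not_dot c hbB]
    · have hnb : (!(c == ' ' || pathStopChars.contains c)) = true := by simpa using hb
      rw [List.takeWhile_cons, hnb]
      simp
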